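-- pv_equiv track=rewrite | github.com/aralfaruqi/alteraproject | Data Structure/Problem Siang/2- Mengelompokan Hewan.py | groupAnimals
-- ===== SOURCE A (Python) =====
-- def groupAnimals(animals):
--     huruf_awal = []
--     for hewan in animals:
--         huruf_awal.append(hewan[0])
--
--     set_huruf_awal = set(huruf_awal)
--     list_huruf_awal = list(set_huruf_awal)
--     list_akhir = []
--
--     swapped = True
--     while swapped:
--         swapped = False
--         maxIter = len(list_huruf_awal)-1
--         for i in range(maxIter):
--             val1 = list_huruf_awal[i]
--             val2 = list_huruf_awal[i+1]
--             if val1>val2: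
--                 list_huruf_awal[i] = val2
--                 list_huruf_awal[i+1] = val1
--                 swapped = True
--
--     for huruf in list_huruf_awal:
--         lst = []
--         for hewan in animals:
--             if huruf == hewan[0]:
--                 lst.append(hewan)
--
--         list_akhir.append(lst)
--
--     return list_akhir
-- ===== SOURCE B (Python) =====
-- def groupAnimals(animals):
--     groups = {}
--     for hewan in animals:
--         groups.setdefault(hewan[0], []).append(hewan)
--     return [groups[k] for k in sorted(groups)]
-- ===== Notes on version B (the rewrite author's own statement) =====
-- stated objective: faster
-- what changed: Replaces the O(k^2) bubble sort of the distinct first letters plus a full re-scan of the animal list per letter with a single-pass dict grouping by first character and sorted() over the keys.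
import Mathlib
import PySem

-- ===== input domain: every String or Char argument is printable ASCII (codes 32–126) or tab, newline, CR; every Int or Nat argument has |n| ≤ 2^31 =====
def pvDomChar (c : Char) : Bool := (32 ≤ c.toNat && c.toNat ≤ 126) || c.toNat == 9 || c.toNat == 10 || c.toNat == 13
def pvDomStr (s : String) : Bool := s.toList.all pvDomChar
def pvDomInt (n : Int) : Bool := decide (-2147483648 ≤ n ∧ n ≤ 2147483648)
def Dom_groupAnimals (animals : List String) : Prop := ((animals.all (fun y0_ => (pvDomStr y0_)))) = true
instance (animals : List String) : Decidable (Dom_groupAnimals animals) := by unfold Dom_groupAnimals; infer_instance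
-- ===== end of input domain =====

-- B replaces A's bubble sort over the distinct first letters and its per-letter re-scan of the
-- animal list by a single-pass dict grouping plus sorted() over the keys (objective: faster).
-- A iterates over list(set(...)), but only after fully sorting it, so its result does not
-- depend on the set's hash order and Set.ofList order is an exact model here.

-- ===== PORT A =====
-- hewan[0] (a one-char string in Python, modelled as the Char; total form, exact under Pre_: nonempty strings)
def pvFirst (h : String) : Char := (PySem.Str.pyGet? h 0).getD default

-- one sweep of A's inner 'for i in range(len-1)' over the mutating list, carrying the element
-- currently at position i ('prev') and the 'swapped' flag
def pvPassAux (prev : Char) : List Char → List Char × Bool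
  | [] => ([prev], false)
  | b :: t =>
    if b < prev then
      let r := pvPassAux prev t
      (b :: r.1, true)
    else
      let r := pvPassAux b t
      (prev :: r.1, r.2)

def pvPass : List Char → List Char × Bool
  | [] => ([], false)
  | a :: t => pvPassAux a t

-- inversion count: an upper bound on the number of swapping passes A's 'while swapped' loop makes,
-- used as the fuel that makes the loop structurally recursive (never exhausted, see pvLoop_perm_chain)
def pvInv : List Char → Nat
  | [] => 0
  | a :: t => t.countP (fun x => decide (x < a)) + pvInv t

-- A's 'while swapped' loop: Python tests swapped=True first, so the pass always runs at least once
def pvLoop : Nat → List Char → List Char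
  | 0, xs => xs
  | f + 1, xs =>
    let r := pvPass xs
    if r.2 then pvLoop f r.1 else r.1

def groupAnimals (animals : List String) : List (List String) :=
  let huruf_awal := animals.foldl (fun acc hewan => acc ++ [pvFirst hewan]) []
  let list_huruf_awal : PySem.Set Char := PySem.Set.ofList huruf_awal
  let sorted_huruf := pvLoop (pvInv list_huruf_awal + 1) list_huruf_awal
  sorted_huruf.foldl
    (fun list_akhir huruf =>
      list_akhir ++ [animals.foldl (fun lst hewan => if huruf == pvFirst hewan then lst ++ [hewan] else lst) []])
    []

-- ===== PORT B =====
def groupAnimals_alt (animals : List String) : List (List String) :=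
  let groups := animals.foldl
    (fun d hewan => PySem.Dict.modify d (pvFirst hewan) [] (fun l => l ++ [hewan]))
    PySem.Dict.empty
  (PySem.List.sorted (PySem.Dict.keys groups) (fun k => k) false).foldl
    (fun acc k => acc ++ [PySem.Dict.getD groups k []]) []

-- ===== PRECONDITION & SPEC =====
-- Pre_ excludes exactly the inputs containing an empty string, on which A raises IndexError (hewan[0]).
def Pre_groupAnimals (animals : List String) : Prop := ∀ s ∈ animals, s.toList ≠ []
instance (animals : List String) : Decidable (Pre_groupAnimals animals) := by unfold Pre_groupAnimals; infer_instance
def pvWitness_groupAnimals : List String := ["cat", "dog", "cow", "ant"]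

def Spec_groupAnimals (animals : List String) (out : List (List String)) : Prop := out = groupAnimals_alt animals
instance (animals : List String) (out : List (List String)) : Decidable (Spec_groupAnimals animals out) := by unfold Spec_groupAnimals; infer_instance

-- ===== CLAIM (what is proved, stated in full; the proofs are below) =====
def Claim_equal_groupAnimals : Prop := ∀ (animals : List String), Dom_groupAnimals animals → Pre_groupAnimals animals → Spec_groupAnimals animals (groupAnimals animals)

-- ===== LEMMAS AND PROOFS =====

theorem pvPassAux_perm (t : List Char) : ∀ a, (pvPassAux a t).1.Perm (a :: t) := by
  induction t with
  | nil => intro a; simp [pvPassAux]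
  | cons b t ih =>
    intro a
    by_cases h : b < a
    · simp only [pvPassAux, if_pos h]
      exact ((ih a).cons b).trans (List.Perm.swap a b t)
    · simp only [pvPassAux, if_neg h]
      exact (ih b).cons a

theorem pvPass_perm (xs : List Char) : (pvPass xs).1.Perm xs := by
  cases xs with
  | nil => simp [pvPass]
  | cons a t => exact pvPassAux_perm t a

theorem pvPassAux_countP (t : List Char) (a : Char) (p : Char → Bool) :
    (pvPassAux a t).1.countP p = (a :: t).countP p :=
  List.Perm.countP_eq p (pvPassAux_perm t a)

theorem pvPassAux_inv_le (t : List Char) :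
    ∀ a, pvInv (pvPassAux a t).1 + ((pvPassAux a t).2.toNat) ≤ pvInv (a :: t) := by
  induction t with
  | nil => intro a; simp [pvPassAux, pvInv]
  | cons b t ih =>
    intro a
    by_cases h : b < a
    · simp only [pvPassAux, if_pos h]
      have hc := pvPassAux_countP t a (fun x => decide (x < b))
      have iha := ih a
      have hba : decide (a < b) = false := by simp [asymm h]
      have hab : decide (b < a) = true := by simpa using h
      simp only [pvInv, List.countP_cons] at *
      simp only [hc, hba, hab] at *
      simp at *
      omega
    · simp only [pvPassAux, if_neg h]
      have hc := pvPassAux_countP t b (fun x => decide (x < a))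
      have ihb := ih b
      simp only [pvInv, List.countP_cons] at *
      simp only [hc] at *
      omega

theorem pvPass_inv_lt (xs : List Char) (h : (pvPass xs).2 = true) :
    pvInv (pvPass xs).1 < pvInv xs := by
  cases xs with
  | nil => simp [pvPass] at h
  | cons a t =>
    have := pvPassAux_inv_le t a
    rw [show pvPass (a :: t) = pvPassAux a t from rfl] at h ⊢
    rw [h] at this
    simpa using this

-- a pass that reports no swap leaves the list unchanged and adjacent-sorted
theorem pvPassAux_false (t : List Char) :
    ∀ a, (pvPassAux a t).2 = false → (pvPassAux a t).1 = a :: t ∧ List.IsChain (· ≤ ·) (a :: t) := by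
  induction t with
  | nil => intro a _; simp [pvPassAux]
  | cons b t ih =>
    intro a h
    by_cases hlt : b < a
    · simp [pvPassAux, hlt] at h
    · simp only [pvPassAux, if_neg hlt] at h ⊢
      obtain ⟨h1, h2⟩ := ih b h
      exact ⟨by rw [h1], List.isChain_cons_cons.mpr ⟨le_of_not_gt hlt, h2⟩⟩

theorem pvPass_false (xs : List Char) (h : (pvPass xs).2 = false) :
    (pvPass xs).1 = xs ∧ List.IsChain (· ≤ ·) xs := by
  cases xs with
  | nil => simp [pvPass]
  | cons a t => exact pvPassAux_false t a h

-- the fuel pvInv xs + 1 is never exhausted: every swapping pass strictly decreases pvInv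
theorem pvLoop_perm_chain (f : Nat) :
    ∀ xs : List Char, pvInv xs < f →
      (pvLoop f xs).Perm xs ∧ List.IsChain (· ≤ ·) (pvLoop f xs) := by
  induction f with
  | zero => intro xs h; omega
  | succ f ih =>
    intro xs _
    simp only [pvLoop]
    by_cases h : (pvPass xs).2 = true
    · rw [if_pos h]
      have hlt := pvPass_inv_lt xs h
      have := ih (pvPass xs).1 (by omega)
      exact ⟨this.1.trans (pvPass_perm xs), this.2⟩
    · rw [if_neg h]
      have hf := pvPass_false xs (by simpa using h)
      rw [hf.1]
      exact ⟨List.Perm.refl _, hf.2⟩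

-- on a duplicate-free list A's bubble loop IS sorted(xs)
theorem pvLoop_eq_sorted (xs : List Char) (hnd : xs.Nodup) :
    pvLoop (pvInv xs + 1) xs = PySem.List.sorted xs (fun x => x) false := by
  obtain ⟨hperm, hchain⟩ := pvLoop_perm_chain (pvInv xs + 1) xs (by omega)
  have hnd' : (pvLoop (pvInv xs + 1) xs).Nodup := hperm.nodup_iff.mpr hnd
  have hle : (pvLoop (pvInv xs + 1) xs).Pairwise (· ≤ ·) := List.IsChain.pairwise hchain
  have hlt : (pvLoop (pvInv xs + 1) xs).Pairwise (fun a b => a < b) := by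
    have := hle.and hnd'
    exact this.imp (fun h => lt_of_le_of_ne h.1 h.2)
  exact (PySem.List.sorted_eq_of_perm_of_pairwise_lt xs _ (fun x => x) hperm hlt).symm

-- B's grouping fold: its key list, generalized over the starting dict
theorem pvGroups_keys (animals : List String) (d : PySem.Dict Char (List String)) :
    (animals.foldl (fun d hewan => PySem.Dict.modify d (pvFirst hewan) [] (fun l => l ++ [hewan])) d).keys
      = PySem.Set.update d.keys (animals.map pvFirst) := by
  induction animals generalizing d with
  | nil => simp [PySem.Set.update]
  | cons a t ih =>
    simp only [List.foldl_cons, List.map_cons, PySem.Set.update_cons]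
    rw [ih]
    congr 1
    rw [PySem.Dict.keys_modify, PySem.Set.add_eq_ite]
    by_cases h : d.contains (pvFirst a) = true
    · rw [PySem.Dict.keys_insert_of_contains _ _ h,
          if_pos ((PySem.Dict.contains_iff_mem_keys _ _).mp h)]
    · rw [PySem.Dict.keys_insert_of_not_contains _ _ (by simpa using h),
          if_neg (fun hm => h ((PySem.Dict.contains_iff_mem_keys _ _).mpr hm))]

-- B's grouping fold: the bucket of any key is the filter of animals, generalized over the start
theorem pvGroups_getD (animals : List String) (d : PySem.Dict Char (List String)) (k : Char) :
    (animals.foldl (fun d hewan => PySem.Dict.modify d (pvFirst hewan) [] (fun l => l ++ [hewan])) d).getD k []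
      = d.getD k [] ++ animals.filter (fun hewan => pvFirst hewan == k) := by
  induction animals generalizing d with
  | nil => simp
  | cons a t ih =>
    simp only [List.foldl_cons, List.filter_cons]
    rw [ih, PySem.Dict.getD_modify]
    by_cases h : k = pvFirst a
    · simp [h]
    · have : (pvFirst a == k) = false := by simpa using fun he => h he.symm
      simp [h, this]

-- ===== VERDICT (by name: the statement is the Claim_ definition above) =====
theorem groupAnimals_spec : Claim_equal_groupAnimals := by
  intro animals _ _
  show groupAnimals animals = groupAnimals_alt animals
  unfold groupAnimals groupAnimals_alt
  simp only [PySem.List.foldl_append_singleton_eq_map, List.nil_append]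
  rw [pvGroups_keys animals PySem.Dict.empty, PySem.Dict.keys_empty,
      PySem.Set.update_nil_left]
  rw [pvLoop_eq_sorted _ (PySem.Set.nodup_ofList (animals.map pvFirst))]
  refine List.map_congr_left (fun k _ => ?_)
  rw [PySem.List.foldl_append_if_eq_filter, pvGroups_getD animals PySem.Dict.empty k]
  simp only [PySem.Dict.getD_empty, List.nil_append]
  refine List.filter_congr (fun h _ => ?_)
  by_cases hkh : k = pvFirst h
  · simp [hkh]
  · simp [hkh, Ne.symm hkh]
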